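-- pv_equiv track=rewrite | github.com/Jake-huen/CodingTestStudy | Algorithm/7.DFS_BFS/60058_programmers.py | solution
-- ===== SOURCE A (Python) =====
-- def solution(p):
--     answer = ''
--     if p == '':
--         return p
--     if check(p):
--         return p
--     u=sep(p)[0]
--     v=sep(p)[1]
--     if check(u):
--         return u+solution(v)
--     else:
--         answer+='('
--         answer+=solution(v)
--         answer+=')'
--         u=u[1:-1]
--         for i in reverse(u):
--             answer+=i
--         # u = u[1:-1]
--         # return ["("] + recursive(v) + [")"] + reverse(u)
--         return answer
--
-- def check(p):
--     x = y = 0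
--     for i in range(len(p)):
--         if p[i] == '(':
--             x += 1
--         elif p[i] == ')':
--             y += 1
--         if x < y:
--             return False
--     return True
--
-- def sep(p):
--     x = y = 0
--     num = 0
--     u = ''
--     v = ''
--     while True:
--         if p[num] == '(':
--             x += 1
--         elif p[num] == ')':
--             y += 1
--         num += 1
--         if x == y:
--             for i in range(num):
--                 u += p[i]
--             for j in range(num, len(p)):
--                 v += p[j]
--             break
--     return u,v
--
-- def reverse(strings):
--     r = {"(":")", ")": "("}
--     return [r[s] for s in strings]
-- ===== SOURCE B (Python) =====
-- def solution(p):
--     flip = {'(': ')', ')': '('}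
--     pre = []          # prefix pieces, in order
--     suf = []          # suffix pieces, newest piece goes FIRST in the result
--     while True:
--         ok = True
--         bal = 0
--         for c in p:
--             bal += 1 if c == '(' else (-1 if c == ')' else 0)
--             if bal < 0:
--                 ok = False
--                 break
--         if ok:
--             return ''.join(pre) + p + ''.join(reversed(suf))
--         bal = 0
--         for i, c in enumerate(p):
--             bal += 1 if c == '(' else (-1 if c == ')' else 0)
--             if bal == 0:
--                 cut = i + 1
--                 break
--         else:
--             raise ValueError('unbalanced parentheses')
--         u, v = p[:cut], p[cut:]
--         ubal = 0
--         uok = True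
--         for c in u:
--             ubal += 1 if c == '(' else (-1 if c == ')' else 0)
--             if ubal < 0:
--                 uok = False
--                 break
--         if uok:
--             pre.append(u)
--         else:
--             pre.append('(')
--             suf.append(')' + ''.join(flip.get(c, c) for c in u[1:-1]))
--         p = v
-- ===== Notes on version B (the rewrite author's own statement) =====
-- stated objective: alternative
-- what changed: A rebuilds strings recursively (sep copies both halves character by character and every recursion level re-concatenates the whole answer); B is a single iterative loop that scans for the first balance-zero cut, keeps prefix and suffix pieces in two lists, and joins them once at the end.
-- outside the precondition, e.g. on solution('a)('): A returns 'a()', B returns 'a()'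
import Mathlib
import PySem

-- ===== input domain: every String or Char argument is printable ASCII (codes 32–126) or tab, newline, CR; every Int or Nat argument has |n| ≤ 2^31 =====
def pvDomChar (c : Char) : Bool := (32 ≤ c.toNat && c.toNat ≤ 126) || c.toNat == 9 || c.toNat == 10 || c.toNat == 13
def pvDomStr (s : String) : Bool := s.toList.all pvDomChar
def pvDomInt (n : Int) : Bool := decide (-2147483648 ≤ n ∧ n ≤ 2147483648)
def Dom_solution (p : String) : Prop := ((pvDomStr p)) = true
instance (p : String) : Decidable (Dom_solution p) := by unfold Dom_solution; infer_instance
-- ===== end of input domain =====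

-- B replaces A's quadratic recursive string rebuilding by a single loop with prefix/suffix
-- accumulator lists joined once at the end (alternative iterative decomposition).

-- ===== PORT A =====
-- check(p): running counters x of opening and y of closing parens; False as soon as x < y.
def checkA : List Char → Int → Int → Bool
  | [], _, _ => true
  | c :: rest, x, y =>
    let xy := if c = '(' then (x + 1, y) else if c = ')' then (x, y + 1) else (x, y)
    if xy.1 < xy.2 then false else checkA rest xy.1 xy.2

-- sep's while-loop: returns the split position num (first point with x == y);
-- none = the loop runs off the end of p (Python IndexError on p[num]).
def sepIdx : List Char → Nat → Int → Int → Option Nat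
  | [], _, _, _ => none
  | c :: rest, num, x, y =>
    let xy := if c = '(' then (x + 1, y) else if c = ')' then (x, y + 1) else (x, y)
    if xy.1 = xy.2 then some (num + 1) else sepIdx rest (num + 1) xy.1 xy.2

theorem sepIdx_lt : ∀ (l : List Char) (i : Nat) (x y : Int) (m : Nat),
    sepIdx l i x y = some m → i < m := by
  intro l
  induction l with
  | nil => intro i x y m h; simp [sepIdx] at h
  | cons c rest ih =>
    intro i x y m h
    simp only [sepIdx] at h
    by_cases h1 : c = '(' <;> by_cases h2 : c = ')' <;> simp [h1, h2] at h <;>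
      split_ifs at h with he <;>
        first
          | (simp at h; omega)
          | (have := ih (i + 1) _ _ _ h; omega)

def rDict : PySem.Dict Char Char := PySem.Dict.ofList [('(', ')'), (')', '(')]

-- reverse(strings) = [r[s] for s in strings]; none = KeyError on a non-paren char.
def reverseA : List Char → Option (List Char)
  | [] => some []
  | c :: rest =>
    match PySem.Dict.get? rDict c with
    | none => none
    | some d =>
      match reverseA rest with
      | none => none
      | some ds => some (d :: ds)

-- solution on List Char.  On the branches where Python raises (sepIdx / reverseA = none,
-- both excluded by Pre_solution) the port returns [].
def solutionA (p : List Char) : List Char :=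
    if hp : p = [] then p
    else if checkA p 0 0 then p
    else
      match h : sepIdx p 0 0 0 with
      | none => []
      | some n =>
        let u := p.take n
        let v := p.drop n
        if checkA u 0 0 then u ++ solutionA v
        else
          match reverseA ((u.drop 1).dropLast) with
          | none => []
          | some rs => '(' :: (solutionA v ++ ')' :: rs)
termination_by p.length
decreasing_by
  all_goals
    have h1 := sepIdx_lt p 0 0 0 n h
    have h2 : 0 < p.length := List.length_pos_of_ne_nil hp
    simp only [List.length_drop]; omega

def solution (p : String) : String := String.ofList (solutionA p.toList)

-- ===== PORT B =====
-- the membership test `bal < 0` loop of Source B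
def okB : List Char → Int → Bool
  | [], _ => true
  | c :: rest, bal =>
    let bal' := bal + (if c = '(' then 1 else if c = ')' then -1 else 0)
    if bal' < 0 then false else okB rest bal'

-- first i+1 with running balance 0; none = the for-else raise (unbalanced input)
def findCut : List Char → Int → Nat → Option Nat
  | [], _, _ => none
  | c :: rest, bal, i =>
    let bal' := bal + (if c = '(' then 1 else if c = ')' then -1 else 0)
    if bal' = 0 then some (i + 1) else findCut rest bal' (i + 1)

theorem findCut_lt : ∀ (l : List Char) (bal : Int) (i m : Nat),
    findCut l bal i = some m → i < m := by
  intro l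
  induction l with
  | nil => intro bal i m h; simp [findCut] at h
  | cons c rest ih =>
    intro bal i m h
    simp only [findCut] at h
    by_cases h1 : c = '(' <;> by_cases h2 : c = ')' <;> simp [h1, h2] at h <;>
      split_ifs at h with he <;>
        first
          | (simp at h; omega)
          | (have := ih _ (i + 1) _ h; omega)

-- flip.get(c, c)
def flipc (c : Char) : Char := if c = '(' then ')' else if c = ')' then '(' else c

-- the while-loop of Source B; pre holds the prefix pieces in order, sufs the suffix pieces
-- newest-first (= Python's reversed(suf)); both are flattened (joined) on return.
def solBLoop (p : List Char) (pre sufs : List (List Char)) : List Char :=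
    if hok : okB p 0 then pre.flatten ++ p ++ sufs.flatten
    else
      match h : findCut p 0 0 with
      | none => []   -- the ValueError raise of Source B (unreachable under Pre_solution)
      | some n =>
        let u := p.take n
        let v := p.drop n
        if okB u 0 then solBLoop v (pre ++ [u]) sufs
        else solBLoop v (pre ++ [['(']]) ((')' :: ((u.drop 1).dropLast.map flipc)) :: sufs)
termination_by p.length
decreasing_by
  all_goals
    have h1 := findCut_lt p 0 0 n h
    have h2 : 0 < p.length := by
      rcases List.eq_nil_or_concat p with rfl | _
      · simp [okB] at hok
      · rename_i hc; rcases hc with ⟨l', a, rfl⟩; simp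
    simp only [List.length_drop]; omega

def solution_alt (p : String) : String := String.ofList (solBLoop p.toList [] [])

-- ===== PRECONDITION & SPEC =====
-- Pre_ excludes inputs where A's recursion can raise (sep's IndexError past the end of an
-- unbalanced segment, or reverse's KeyError on a non-paren character inside a wrapped
-- segment): strings that neither keep every prefix's closing-parenthesis count at most its
-- opening-parenthesis count nor consist purely of parentheses with equal counts.  On a few
-- such strings A still returns, and B agrees there (see the cite in claim.json).
def Pre_solution (p : String) : Prop :=
  (∀ i < p.toList.length + 1,
      (p.toList.take i).count ')' ≤ (p.toList.take i).count '(')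
  ∨ ((p.toList.all (fun c => c == '(' || c == ')')) = true
      ∧ p.toList.count '(' = p.toList.count ')')
instance (p : String) : Decidable (Pre_solution p) := by unfold Pre_solution; infer_instance

def pvWitness_solution : String := "(()))("

def Spec_solution (p : String) (out : String) : Prop := out = solution_alt p
instance (p : String) (out : String) : Decidable (Spec_solution p out) := by
  unfold Spec_solution; infer_instance

-- ===== CLAIM =====
def Claim_equal_solution : Prop :=
  ∀ (p : String), Dom_solution p → Pre_solution p → Spec_solution p (solution p)

-- ===== LEMMAS AND PROOFS =====

-- A's check equals B's check under the invariant bal = x - y.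
theorem check_eq_ok : ∀ (l : List Char) (x y : Int), checkA l x y = okB l (x - y) := by
  intro l
  induction l with
  | nil => intro x y; simp [checkA, okB]
  | cons c rest ih =>
    intro x y
    by_cases h1 : c = '(' <;> by_cases h2 : c = ')'
    · simp [h1] at h2
    · subst h1
      simp [checkA, okB]
      rw [show x - y + 1 = x + 1 - y by ring, ih (x + 1) y]
      have he : (x + 1 - y < 0) ↔ (x + 1 < y) := by omega
      simp [he]
    · subst h2
      simp [checkA, okB]
      rw [show x - y + -1 = x - (y + 1) by ring, ih x (y + 1)]
      have he : (x - y < 1) ↔ (x ≤ y) := by omega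
      simp [he]
    · simp [checkA, okB, h1, h2]
      rw [ih x y]

-- A's split search equals B's under the same invariant.
theorem sep_eq_cut : ∀ (l : List Char) (i : Nat) (x y : Int),
    sepIdx l i x y = findCut l (x - y) i := by
  intro l
  induction l with
  | nil => intro i x y; simp [sepIdx, findCut]
  | cons c rest ih =>
    intro i x y
    by_cases h1 : c = '(' <;> by_cases h2 : c = ')'
    · simp [h1] at h2
    · subst h1
      simp [sepIdx, findCut]
      rw [show x - y + 1 = x + 1 - y by ring]
      have he : (x + 1 - y = 0) ↔ (x + 1 = y) := by omega
      simp only [he]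
      split_ifs <;> first | rfl | exact ih (i + 1) (x + 1) y
    · subst h2
      simp [sepIdx, findCut]
      rw [show x - y + -1 = x - (y + 1) by ring]
      have he : (x - (y + 1) = 0) ↔ (x = y + 1) := by omega
      simp only [he]
      split_ifs <;> first | rfl | exact ih (i + 1) x (y + 1)
    · simp [sepIdx, findCut, h1, h2]
      have he : (x - y = 0) ↔ (x = y) := by omega
      simp only [he]
      split_ifs <;> first | rfl | exact ih (i + 1) x y

-- if the whole remaining list rebalances x,y and is nonempty, sep's loop finds a split
theorem sepIdx_some_of_bal : ∀ (l : List Char) (i : Nat) (x y : Int),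
    l ≠ [] → x + (l.count '(' : Int) = y + (l.count ')' : Int) →
    ∃ m, sepIdx l i x y = some m := by
  intro l
  induction l with
  | nil => intro i x y h; exact absurd rfl h
  | cons c rest ih =>
    intro i x y _ hbal
    simp only [sepIdx]
    by_cases h1 : c = '(' <;> by_cases h2 : c = ')' <;> simp [h1, h2] at hbal ⊢
    · subst h1; simp at h2
    all_goals (
      split_ifs with he
      · exact ⟨i + 1, rfl⟩
      · rcases List.eq_nil_or_concat rest with hr | _
        · subst hr; simp at hbal; omega
        · apply ih (i + 1)
          · rename_i hconc; rcases hconc with ⟨l', a, rfl⟩; simp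
          · omega)

-- the split position records equal updated counters, i.e. the taken prefix rebalances x,y
theorem sepIdx_counts : ∀ (l : List Char) (i : Nat) (x y : Int) (m : Nat),
    sepIdx l i x y = some m →
    m - i ≤ l.length ∧ 1 ≤ m - i ∧
      x + ((l.take (m - i)).count '(' : Int) = y + ((l.take (m - i)).count ')' : Int) := by
  intro l
  induction l with
  | nil => intro i x y m h; simp [sepIdx] at h
  | cons c rest ih =>
    intro i x y m h
    simp only [sepIdx] at h
    by_cases h1 : c = '(' <;> by_cases h2 : c = ')' <;> simp [h1, h2] at h
    · subst h1; simp at h2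
    all_goals (
      split_ifs at h with he
      · obtain rfl : m = i + 1 := (Option.some.inj h).symm
        have ht : i + 1 - i = 1 := by omega
        simp [ht, h1, h2]
        omega
      · obtain ⟨hle, h1le, hc⟩ := ih (i + 1) _ _ m h
        have hmi : m - i = (m - (i + 1)) + 1 := by
          have := sepIdx_lt rest (i + 1) _ _ m h; omega
        rw [hmi]
        simp only [List.take_succ_cons, List.length_cons, List.count_cons]
        refine ⟨by omega, by omega, ?_⟩
        simp [h1, h2]
        omega)

-- reverse succeeds on pure-paren input and is char-by-char flipping
theorem reverseA_parenOnly : ∀ (l : List Char),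
    (∀ c ∈ l, c = '(' ∨ c = ')') → reverseA l = some (l.map flipc) := by
  intro l
  induction l with
  | nil => intro _; simp [reverseA]
  | cons c rest ih =>
    intro h
    have hc := h c (by simp)
    have hrest : ∀ c ∈ rest, c = '(' ∨ c = ')' := fun d hd => h d (by simp [hd])
    rcases hc with rfl | rfl <;>
      simp [reverseA, ih hrest, rDict, PySem.Dict.ofList, PySem.Dict.get?, flipc] <;> rfl

-- counts split at an index
theorem count_take_drop (l : List Char) (n : Nat) (c : Char) :
    l.count c = (l.take n).count c + (l.drop n).count c := by
  conv_lhs => rw [← List.take_append_drop n l]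
  rw [List.count_append]

-- main loop invariant: on pure balanced paren input B's loop produces
-- pre ++ (A's recursive answer) ++ suffixes
theorem main_inv : ∀ (N : Nat) (p : List Char), p.length = N →
    (∀ c ∈ p, c = '(' ∨ c = ')') → p.count '(' = p.count ')' →
    ∀ (pre sufs : List (List Char)),
      solBLoop p pre sufs = pre.flatten ++ solutionA p ++ sufs.flatten := by
  intro N
  induction N using Nat.strong_induction_on with
  | _ N ih =>
    intro p hlen hpo hbal pre sufs
    have hco := check_eq_ok p 0 0
    norm_num at hco
    by_cases hok : okB p 0 = true
    · have hchk : checkA p 0 0 = true := by rw [hco]; exact hok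
      rw [solBLoop.eq_def, solutionA.eq_def]
      simp only [hok, if_true, hchk]
      split_ifs <;> rfl
    · rw [Bool.not_eq_true] at hok
      have hchk : checkA p 0 0 = false := by rw [hco]; exact hok
      have hok2 : ¬ (okB p 0 = true) := by simp [hok]
      have hpne : p ≠ [] := by
        intro hnil; subst hnil; simp [checkA] at hchk
      obtain ⟨m, hm⟩ := sepIdx_some_of_bal p 0 0 0 hpne (by omega)
      have hcut : findCut p 0 0 = some m := by
        have h00 := sep_eq_cut p 0 0 0
        norm_num at h00
        rw [← h00]; exact hm
      rw [solBLoop.eq_def, solutionA.eq_def]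
      simp only [dif_neg hpne, hchk, Bool.false_eq_true, if_false, dif_neg hok2]
      obtain ⟨hmle, hm1, hcnt⟩ := sepIdx_counts p 0 0 0 m hm
      simp only [Nat.sub_zero] at hmle hm1 hcnt
      have hu : (p.take m).count '(' = (p.take m).count ')' := by omega
      have hv : (p.drop m).count '(' = (p.drop m).count ')' := by
        have h1 := count_take_drop p m '('
        have h2 := count_take_drop p m ')'
        omega
      have hupo : ∀ c ∈ p.take m, c = '(' ∨ c = ')' :=
        fun c hc => hpo c (List.mem_of_mem_take hc)
      have hvpo : ∀ c ∈ p.drop m, c = '(' ∨ c = ')' :=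
        fun c hc => hpo c (List.mem_of_mem_drop hc)
      have hvlt : (p.drop m).length < N := by
        have hl0 : 0 < p.length := List.length_pos_of_ne_nil hpne
        simp only [List.length_drop]; omega
      have ihv := ih (p.drop m).length hvlt (p.drop m) rfl hvpo hv
      have hcu := check_eq_ok (p.take m) 0 0
      norm_num at hcu
      -- resolve B's match on findCut
      split
      · rename_i heqB; rw [hcut] at heqB; cases heqB
      rename_i nB heqB
      rw [hcut] at heqB
      obtain rfl : nB = m := (Option.some.inj heqB).symm
      by_cases huok : checkA (p.take nB) 0 0 = true
      · have hbu : okB (p.take nB) 0 = true := by rw [← hcu]; exact huok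
        rw [if_pos hbu]
        -- resolve A's match on sepIdx
        split
        · rename_i heqA; rw [hm] at heqA; cases heqA
        rename_i nA heqA
        rw [hm] at heqA
        obtain rfl : nA = nB := (Option.some.inj heqA).symm
        rw [if_pos huok, ihv]
        simp
      · have hbu : okB (p.take nB) 0 = false := by
          rw [← hcu]; rw [Bool.not_eq_true] at huok; exact huok
        rw [if_neg (by simp [hbu])]
        -- resolve A's match on sepIdx
        split
        · rename_i heqA; rw [hm] at heqA; cases heqA
        rename_i nA heqA
        rw [hm] at heqA
        obtain rfl : nA = nB := (Option.some.inj heqA).symm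
        rw [if_neg huok]
        have hcore : ∀ c ∈ ((p.take nA).drop 1).dropLast, c = '(' ∨ c = ')' :=
          fun c hc => hupo c (List.mem_of_mem_drop ((List.dropLast_sublist _).mem hc))
        rw [reverseA_parenOnly _ hcore, ihv]
        simp

-- checkA is implied by the prefix-count condition of Pre_solution
theorem checkA_of_prefix : ∀ (l : List Char) (x y : Int),
    (∀ i < l.length + 1,
        y + ((l.take i).count ')' : Int) ≤ x + ((l.take i).count '(' : Int)) →
    checkA l x y = true := by
  intro l
  induction l with
  | nil => intro x y _; simp [checkA]
  | cons c rest ih =>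
    intro x y h
    have h1 := h 1 (by simp)
    simp only [List.take_succ_cons, List.take_zero, List.count_cons, List.count_nil] at h1
    simp only [checkA]
    by_cases hc1 : c = '(' <;> by_cases hc2 : c = ')'
    · simp [hc1] at hc2
    all_goals (
      simp [hc1, hc2] at h1 ⊢
      refine ⟨h1, ?_⟩
      apply ih
      · intro i hi
        have hhi := h (i + 1) (by simp; omega)
        simp only [List.take_succ_cons, List.count_cons] at hhi
        simp [hc1, hc2] at hhi
        omega)

-- ===== VERDICT =====
theorem solution_spec : Claim_equal_solution := by
  intro p _ hpre
  unfold Spec_solution solution solution_alt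
  rcases hpre with hpref | ⟨hpo, hbal⟩
  · have hchk : checkA p.toList 0 0 = true := by
      apply checkA_of_prefix
      intro i hi
      have := hpref i hi
      omega
    have hok : okB p.toList 0 = true := by
      have := check_eq_ok p.toList 0 0
      norm_num at this
      rw [← this]; exact hchk
    rw [solutionA.eq_def, solBLoop.eq_def]
    simp only [hchk, hok, if_true]
    split_ifs <;> simp
  · have hpo' : ∀ c ∈ p.toList, c = '(' ∨ c = ')' := by
      simp only [List.all_eq_true, Bool.or_eq_true, beq_iff_eq] at hpo
      exact hpo
    rw [main_inv p.toList.length p.toList rfl hpo' hbal]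
    simp
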